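-- pv_equiv track=rewrite | github.com/tramebleue/python-topojson | topojson/delta.py | delta_encode
-- ===== SOURCE A (Python) =====
-- def delta_encode(coordinates):
--
--     x0, y0 = coordinates[0]
--     delta_coords = [[ x0, y0 ]]
--
--     for x, y in coordinates[1:]:
--
--         if not (x == x0 and y == y0):
--             delta_coords.append([ x - x0, y - y0 ])
--             x0 = x
--             y0 = y
--
--     if len(delta_coords) == 1:
--         delta_coords.append([ 0, 0 ])
--
--     return delta_coords
-- ===== SOURCE B (Python) =====
-- def delta_encode(coordinates):
--     x0, y0 = coordinates[0]
--     uniq = [coordinates[0]] + [c for p, c in zip(coordinates, coordinates[1:]) if c != p]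
--     out = [[x0, y0]] + [[x - px, y - py] for (px, py), (x, y) in zip(uniq, uniq[1:])]
--     if len(out) == 1:
--         out.append([0, 0])
--     return out
-- ===== Notes on version B (the rewrite author's own statement) =====
-- stated objective: alternative
-- what changed: Replaces A's single stateful loop (mutable x0,y0 accumulator with in-loop dedup) by a two-phase pipeline: first collapse consecutive duplicates by zipping the list against its shift, then compute deltas by zipping the deduplicated list against its own shift.
import Mathlib
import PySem

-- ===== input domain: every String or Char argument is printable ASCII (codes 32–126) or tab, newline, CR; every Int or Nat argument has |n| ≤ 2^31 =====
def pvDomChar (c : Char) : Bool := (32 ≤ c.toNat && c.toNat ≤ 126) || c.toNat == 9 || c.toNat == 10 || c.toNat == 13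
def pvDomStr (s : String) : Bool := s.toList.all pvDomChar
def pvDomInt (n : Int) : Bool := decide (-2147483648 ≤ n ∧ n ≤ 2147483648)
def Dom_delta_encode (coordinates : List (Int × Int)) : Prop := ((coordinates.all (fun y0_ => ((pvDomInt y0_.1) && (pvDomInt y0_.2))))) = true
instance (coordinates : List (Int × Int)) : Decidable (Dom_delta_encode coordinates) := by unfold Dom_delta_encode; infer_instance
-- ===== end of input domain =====

-- B replaces A's stateful dedup-and-delta loop by a two-phase zip-with-shift pipeline (same cost; alternative decomposition). Pre_ excludes the empty list, where A raises IndexError.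


-- ===== PORT A =====
-- A's for-loop over coordinates[1:] with mutable state (x0, y0)
def deltaLoopA (x0 y0 : Int) : List (Int × Int) → List (List Int)
  | [] => []
  | (x, y) :: rest =>
      if ¬(x = x0 ∧ y = y0) then [x - x0, y - y0] :: deltaLoopA x y rest
      else deltaLoopA x0 y0 rest

def delta_encode (coordinates : List (Int × Int)) : List (List Int) :=
  match coordinates with
  | [] => []   -- unreachable: Python raises IndexError on coordinates[0]; excluded by Pre_
  | (x0, y0) :: rest =>
      let delta_coords := [x0, y0] :: deltaLoopA x0 y0 rest
      if delta_coords.length = 1 then delta_coords ++ [[0, 0]] else delta_coords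

-- ===== PORT B =====
def delta_encode_alt (coordinates : List (Int × Int)) : List (List Int) :=
  match coordinates with
  | [] => []   -- unreachable: Python raises IndexError on coordinates[0]; excluded by Pre_
  | c0 :: rest =>
      let uniq : List (Int × Int) :=
        c0 :: ((coordinates.zip rest).filterMap (fun pc => if pc.2 ≠ pc.1 then some pc.2 else none))
      let out : List (List Int) :=
        [c0.1, c0.2] :: ((uniq.zip uniq.tail).map (fun pc => [pc.2.1 - pc.1.1, pc.2.2 - pc.1.2]))
      if out.length = 1 then out ++ [[0, 0]] else out

-- ===== PRECONDITION & SPEC =====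
-- Pre_ excludes exactly the empty list, on which Python A raises IndexError.
def Pre_delta_encode (coordinates : List (Int × Int)) : Prop := coordinates ≠ []
instance (coordinates : List (Int × Int)) : Decidable (Pre_delta_encode coordinates) := by unfold Pre_delta_encode; infer_instance
def pvWitness_delta_encode : (List (Int × Int)) := [(1, 2), (1, 2), (4, 7)]

def Spec_delta_encode (coordinates : List (Int × Int)) (out : List (List Int)) : Prop := out = delta_encode_alt coordinates
instance (coordinates : List (Int × Int)) (out : List (List Int)) : Decidable (Spec_delta_encode coordinates out) := by unfold Spec_delta_encode; infer_instance

-- ===== CLAIM (what is proved, stated in full; the proofs are below) =====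
def Claim_equal_delta_encode : Prop := ∀ (coordinates : List (Int × Int)), Dom_delta_encode coordinates → Pre_delta_encode coordinates → Spec_delta_encode coordinates (delta_encode coordinates)

-- ===== LEMMAS AND PROOFS =====

-- recursive form of B's consecutive-duplicate collapse
def dedupR (p : Int × Int) : List (Int × Int) → List (Int × Int)
  | [] => []
  | c :: cs => if c ≠ p then c :: dedupR c cs else dedupR p cs

-- recursive form of B's pairwise-difference pass
def diffsR (p : Int × Int) : List (Int × Int) → List (List Int)
  | [] => []
  | c :: cs => [c.1 - p.1, c.2 - p.2] :: diffsR c cs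

theorem dedup_zip_eq (rest : List (Int × Int)) : ∀ p : Int × Int,
    ((p :: rest).zip rest).filterMap (fun pc => if pc.2 ≠ pc.1 then some pc.2 else none)
      = dedupR p rest := by
  induction rest with
  | nil => intro p; simp [dedupR]
  | cons c cs ih =>
      intro p
      simp only [List.zip_cons_cons, List.filterMap_cons, dedupR]
      by_cases h : c = p
      · subst h
        simp only [ne_eq, not_true_eq_false, if_false, ite_not]
        simpa using ih c
      · simp only [ne_eq, h, not_false_eq_true, if_pos, ite_not,
          List.cons.injEq, true_and]
        simpa using ih c

theorem diffs_zip_eq (l : List (Int × Int)) : ∀ p : Int × Int,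
    ((p :: l).zip l).map (fun pc => [pc.2.1 - pc.1.1, pc.2.2 - pc.1.2]) = diffsR p l := by
  induction l with
  | nil => intro p; simp [diffsR]
  | cons c cs ih => intro p; simp [diffsR, ih]

theorem loopA_eq (rest : List (Int × Int)) : ∀ x0 y0 : Int,
    deltaLoopA x0 y0 rest = diffsR (x0, y0) (dedupR (x0, y0) rest) := by
  induction rest with
  | nil => intro x0 y0; simp [deltaLoopA, dedupR, diffsR]
  | cons c cs ih =>
      intro x0 y0
      obtain ⟨x, y⟩ := c
      simp only [deltaLoopA, dedupR]
      by_cases h : x = x0 ∧ y = y0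
      · have hc : (x, y) = (x0, y0) := by simp [h.1, h.2]
        simp [h, ih]
      · have hc : (x, y) ≠ (x0, y0) := by
          intro he; exact h ⟨congrArg Prod.fst he, congrArg Prod.snd he⟩
        simp [h, diffsR, ih]

-- ===== VERDICT (by name: the statement is the Claim_ definition above) =====
theorem delta_encode_spec : Claim_equal_delta_encode := by
  intro coordinates _ hpre
  unfold Spec_delta_encode
  match coordinates with
  | [] => exact absurd rfl hpre
  | (x0, y0) :: rest =>
      simp only [delta_encode, delta_encode_alt, dedup_zip_eq, diffs_zip_eq, List.tail_cons,
        loopA_eq]
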